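-- pv_equiv track=rewrite | github.com/ujjwal-2706/COL215-Lab-Assignment | Software Assignment 3/kmap.py | produce_terms
-- ===== SOURCE A (Python) =====
-- def complement(single_literal):
--     if len(single_literal) == 2:
--         return single_literal[0]
--     else:
--         return single_literal + "'"
--
-- def produce_terms(reduced_term):
--     if len(reduced_term) == 1:
--         return [reduced_term,[complement(reduced_term[0])]]
--     else:
--         last = reduced_term.pop()
--         value = produce_terms(reduced_term)
--         answer = []
--         for literal_list in value:
--             new_value = [term for term in literal_list]
--             new_value.append(last)
--             literal_list.append(complement(last))
--             answer.append(new_value)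
--             answer.append(literal_list)
--         return answer
-- ===== SOURCE B (Python) =====
-- def complement(single_literal):
--     if len(single_literal) == 2:
--         return single_literal[0]
--     else:
--         return single_literal + "'"
--
-- def produce_terms(reduced_term):
--     result = []
--     for num in range(2 ** len(reduced_term)):
--         term = []
--         for lit in reversed(reduced_term):
--             term.append(lit if num % 2 == 0 else complement(lit))
--             num //= 2
--         term.reverse()
--         result.append(term)
--     return result
-- ===== Notes on version B (the rewrite author's own statement) =====
-- stated objective: idiomatic
-- what changed: Replaces A's destructive recursion (pop the last literal, recurse, interleave copies) with a direct iterative binary enumeration: for each num in range(2**n) decode num's bits LSB-first over the reversed term to pick literal (bit 0) or complement (bit 1); B also does not mutate its argument, while A pops it down to one element.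
-- outside the precondition, e.g. on produce_terms([]): A raises IndexError, B returns [[]]
import Mathlib
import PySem

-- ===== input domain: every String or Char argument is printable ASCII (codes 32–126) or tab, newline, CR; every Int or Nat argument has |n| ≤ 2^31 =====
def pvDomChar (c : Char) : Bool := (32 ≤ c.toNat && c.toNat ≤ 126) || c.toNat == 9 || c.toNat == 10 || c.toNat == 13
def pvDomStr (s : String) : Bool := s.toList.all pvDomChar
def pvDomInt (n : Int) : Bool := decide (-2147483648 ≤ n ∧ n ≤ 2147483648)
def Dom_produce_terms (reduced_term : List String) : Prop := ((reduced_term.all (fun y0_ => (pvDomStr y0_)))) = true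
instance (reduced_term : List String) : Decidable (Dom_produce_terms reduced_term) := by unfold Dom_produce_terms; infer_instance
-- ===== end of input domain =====

-- B replaces A's destructive pop-and-recurse interleaving with an iterative binary enumeration
-- (num in range(2**n), bits decoded LSB-first over the reversed term); equivalence is about the
-- RETURN value only: A pops its list argument down to one element, B does not mutate it.

-- ===== PORT A =====
-- shared helper: the Python 'complement' used verbatim by both A and B
def pycomplement (single_literal : String) : String :=
  if PySem.Str.len single_literal = 2 then
    match PySem.Str.pyGet? single_literal 0 with
    | some c => String.ofList [c]   -- in range: the branch guarantees length 2
    | none => ""                    -- unreachable under the branch guard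
  else String.ofList (single_literal.toList ++ ['\''])

def produce_terms (reduced_term : List String) : List (List String) :=
  if reduced_term.length = 1 then
    [reduced_term, [pycomplement ((PySem.List.pyGet? reduced_term 0).getD "")]]
  else
    match hp : PySem.List.pop? reduced_term (-1) with
    | none => []   -- Python raises IndexError here (empty list); excluded by Pre_
    | some (last, rest) =>
      let value := produce_terms rest
      value.foldl
        (fun answer literal_list =>
          answer ++ [literal_list ++ [last], literal_list ++ [pycomplement last]]) []
termination_by reduced_term.length
decreasing_by have := PySem.List.length_of_pop?_eq_some reduced_term hp; simp at this; omega

-- ===== PORT B =====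
def produce_terms_alt (reduced_term : List String) : List (List String) :=
  (PySem.List.pyRange 0 ((2 : Int) ^ reduced_term.length) 1).foldl
    (fun result num =>
      let st := reduced_term.reverse.foldl
        (fun (st : List String × Int) lit =>
          (st.1 ++ [if PySem.Int.mod st.2 2 = 0 then lit else pycomplement lit],
           PySem.Int.floordiv st.2 2))
        ([], num)
      result ++ [st.1.reverse]) []

-- ===== PRECONDITION & SPEC =====
-- Pre_ excludes only the empty list, on which Python's A raises IndexError (pop from empty list); B returns [[]] there.
def Pre_produce_terms (reduced_term : List String) : Prop := reduced_term ≠ []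
instance (reduced_term : List String) : Decidable (Pre_produce_terms reduced_term) := by
  unfold Pre_produce_terms; infer_instance
def pvWitness_produce_terms : List String := (["a"])

def Spec_produce_terms (reduced_term : List String) (out : List (List String)) : Prop :=
  out = produce_terms_alt reduced_term
instance (reduced_term : List String) (out : List (List String)) :
    Decidable (Spec_produce_terms reduced_term out) := by
  unfold Spec_produce_terms; infer_instance

-- ===== CLAIM (what is proved, stated in full; the proofs are below) =====
def Claim_equal_produce_terms : Prop :=
  ∀ (reduced_term : List String), Dom_produce_terms reduced_term →
    Pre_produce_terms reduced_term →
    Spec_produce_terms reduced_term (produce_terms reduced_term)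

-- ===== LEMMAS AND PROOFS =====

-- proof-side reading of B's inner loop: decode the bits of k LSB-first along ys
def rowRev (k : Int) : List String → List String
  | [] => []
  | y :: ys =>
      (if PySem.Int.mod k 2 = 0 then y else pycomplement y) :: rowRev (PySem.Int.floordiv k 2) ys

theorem inner_foldl_eq_rowRev (ys : List String) :
    ∀ (acc : List String) (k : Int),
      ys.foldl
        (fun (st : List String × Int) lit =>
          (st.1 ++ [if PySem.Int.mod st.2 2 = 0 then lit else pycomplement lit],
           PySem.Int.floordiv st.2 2))
        (acc, k)
      = (acc ++ rowRev k ys, ys.foldl (fun k _ => PySem.Int.floordiv k 2) k) := by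
  induction ys with
  | nil => intro acc k; simp [rowRev]
  | cons y ys ih =>
    intro acc k
    simp only [List.foldl_cons, ih, rowRev, List.append_assoc, List.cons_append, List.nil_append]

theorem alt_eq_map (xs : List String) :
    produce_terms_alt xs
      = (List.range (2 ^ xs.length)).map (fun (k : Nat) => (rowRev ((k : Nat) : Int) xs.reverse).reverse) := by
  unfold produce_terms_alt
  simp only [inner_foldl_eq_rowRev, List.nil_append]
  rw [PySem.List.foldl_append_singleton_eq_map]
  rw [PySem.List.pyRange_one]
  have h2 : ((2:ℤ) ^ xs.length - 0) = ((2 ^ xs.length : ℕ) : ℤ) := by push_cast; ring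
  rw [h2, Int.toNat_natCast, List.map_map]
  simp only [Function.comp_def, zero_add, List.nil_append]

theorem range_double (N : Nat) :
    List.range (2 * N) = (List.range N).flatMap (fun q => [2 * q, 2 * q + 1]) := by
  induction N with
  | zero => rfl
  | succ n ih =>
    have h : 2 * (n + 1) = 2 * n + 1 + 1 := by omega
    rw [h, List.range_succ, List.range_succ, List.range_succ, ih]
    simp

theorem alt_append (xs : List String) (l : String) :
    produce_terms_alt (xs ++ [l])
      = (produce_terms_alt xs).flatMap
          (fun r => [r ++ [l], r ++ [pycomplement l]]) := by
  rw [alt_eq_map, alt_eq_map]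
  have hlen : (xs ++ [l]).length = xs.length + 1 := by simp
  rw [hlen]
  rw [pow_succ, mul_comm, range_double]
  rw [List.map_flatMap, List.flatMap_map]
  refine List.flatMap_congr (fun q _ => ?_)
  have hrev : (xs ++ [l]).reverse = l :: xs.reverse := by simp
  have hq0 : (2 * (q:ℤ)) / 2 = (q:ℤ) := by omega
  have hq1 : (2 * (q:ℤ) + 1) / 2 = (q:ℤ) := by omega
  simp [hrev, rowRev, hq0, hq1]

theorem A_append (xs : List String) (l : String) (hne : xs ≠ []) :
    produce_terms (xs ++ [l])
      = (produce_terms xs).flatMap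
          (fun r => [r ++ [l], r ++ [pycomplement l]]) := by
  rw [produce_terms.eq_def]
  have hlen : ¬ (xs ++ [l]).length = 1 := by
    cases xs with
    | nil => exact absurd rfl hne
    | cons a t => simp
  rw [if_neg hlen]
  split
  next hnone =>
    rw [PySem.List.pop?_last] at hnone
    cases hnone
  next last rest hsome =>
    rw [PySem.List.pop?_last] at hsome
    obtain ⟨rfl, rfl⟩ : l = last ∧ xs = rest := by
      simpa using hsome
    exact PySem.List.foldl_append_eq_flatMap _ _ _

theorem main_eq (xs : List String) (hne : xs ≠ []) :
    produce_terms xs = produce_terms_alt xs := by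
  induction xs using List.reverseRecOn with
  | nil => exact absurd rfl hne
  | append_singleton ys l ih =>
    rcases eq_or_ne ys [] with h | h
    · subst h
      simp only [List.nil_append]
      rw [produce_terms.eq_def]
      have hB : produce_terms_alt [l] = [[l], [pycomplement l]] := by
        rw [show [l] = ([] : List String) ++ [l] from rfl, alt_append]
        have h0 : produce_terms_alt ([] : List String) = [[]] := rfl
        rw [h0]; rfl
      simp [hB]
    · rw [A_append ys l h, alt_append ys l, ih h]

-- ===== VERDICT (by name: the statement is the Claim_ definition above) =====
theorem produce_terms_spec : Claim_equal_produce_terms := by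
  intro xs _ hpre
  unfold Spec_produce_terms
  exact main_eq xs hpre
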